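-- pv_equiv track=rewrite | github.com/chrisvonwielligh/spoegwolf-daily | spoegwolf_daily/main.py | _sum_by_names
-- ===== SOURCE A (Python) =====
-- def _norm(s: str) -> str:
--     return (s or "").strip().lower()
--
-- def _sum_by_names(ticket_info, wanted_names):
--     wanted = {_norm(n) for n in (wanted_names or [])}
--     total = 0
--     for t in (ticket_info or []):
--         name = _norm(t.get("ticketName"))
--         if name in wanted:
--             total += int(t.get("ticketsIssued") or 0)
--     return total
-- ===== SOURCE B (Python) =====
-- def _norm(s: str) -> str:
--     return (s or "").strip().lower()
--
-- def _sum_by_names(ticket_info, wanted_names):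
--     # Group each ticket's raw issued-count under its normalized name, then
--     # total the counts for the wanted names (iterating over the wanted set).
--     by_name = {}
--     for t in (ticket_info or []):
--         by_name.setdefault(_norm(t.get("ticketName")), []).append(t.get("ticketsIssued"))
--     wanted = {_norm(n) for n in (wanted_names or [])}
--     return sum(int(v or 0) for name in wanted for v in by_name.get(name, []))
-- ===== Notes on version B (the rewrite author's own statement) =====
-- stated objective: alternative
-- what changed: B replaces A's single filter-and-sum pass over tickets by a grouping pass that builds a dict from each normalized name to its list of raw issued-counts, then sums by iterating over the wanted-name set and looking each name up in that table; Pre_ excludes only the inputs where A itself raises ValueError (a wanted ticket with a non-empty, non-integer ticketsIssued string).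
import Mathlib
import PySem

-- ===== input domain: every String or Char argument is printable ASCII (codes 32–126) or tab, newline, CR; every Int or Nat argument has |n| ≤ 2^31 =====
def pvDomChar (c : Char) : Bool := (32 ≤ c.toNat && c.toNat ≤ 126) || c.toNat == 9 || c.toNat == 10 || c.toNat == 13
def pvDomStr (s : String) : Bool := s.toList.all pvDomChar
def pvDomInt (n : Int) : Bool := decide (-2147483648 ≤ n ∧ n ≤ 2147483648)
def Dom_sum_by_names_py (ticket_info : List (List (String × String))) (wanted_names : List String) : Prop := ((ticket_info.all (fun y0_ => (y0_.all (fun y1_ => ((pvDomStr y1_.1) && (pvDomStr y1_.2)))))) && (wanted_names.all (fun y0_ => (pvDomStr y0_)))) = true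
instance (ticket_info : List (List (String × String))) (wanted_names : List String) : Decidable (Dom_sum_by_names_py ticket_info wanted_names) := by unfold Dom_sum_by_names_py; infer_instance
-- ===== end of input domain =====

-- ===== PORT A =====
-- B groups each ticket's raw count under its normalized name, then totals over the wanted names (alternative decomposition; return value only).
def pvNorm (s : String) : String := PySem.Str.lower (PySem.Str.strip s)

-- int(v or 0) for v : Optional[str] (total form; Pre_ excludes inputs where Python's int() raises)
def pvVal (v : Option String) : Int :=
  match v with
  | none => 0
  | some s => if s = "" then 0 else (PySem.Int.ofStr? s).getD 0

def sum_by_names_py (ticket_info : List (List (String × String))) (wanted_names : List String) : Int :=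
  let wanted := PySem.Set.ofList (wanted_names.map pvNorm)
  ticket_info.foldl (fun total t =>
    let name := pvNorm (((PySem.Dict.mk t).get? "ticketName").getD "")
    if name ∈ wanted then total + pvVal ((PySem.Dict.mk t).get? "ticketsIssued")
    else total) 0

-- ===== PORT B =====
def sum_by_names_py_alt (ticket_info : List (List (String × String))) (wanted_names : List String) : Int :=
  let by_name : PySem.Dict String (List (Option String)) :=
    ticket_info.foldl (fun d t =>
      let name := pvNorm (((PySem.Dict.mk t).get? "ticketName").getD "")
      d.modify name [] (· ++ [(PySem.Dict.mk t).get? "ticketsIssued"]))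
      PySem.Dict.empty
  let wanted := PySem.Set.ofList (wanted_names.map pvNorm)
  wanted.foldl (fun acc name =>
    acc + (by_name.getD name []).foldl (fun s v => s + pvVal v) 0) 0

-- ===== PRECONDITION & SPEC =====
-- Pre_ excludes exactly the inputs where Python A raises ValueError: a ticket whose
-- normalized name is wanted but whose non-empty ticketsIssued string is not int()-parseable.
def Pre_sum_by_names_py (ticket_info : List (List (String × String))) (wanted_names : List String) : Prop :=
  ∀ t ∈ ticket_info,
    pvNorm (((PySem.Dict.mk t).get? "ticketName").getD "") ∈ wanted_names.map pvNorm →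
    (((PySem.Dict.mk t).get? "ticketsIssued").all
      (fun s => s == "" || (PySem.Int.ofStr? s).isSome)) = true
instance (ticket_info : List (List (String × String))) (wanted_names : List String) : Decidable (Pre_sum_by_names_py ticket_info wanted_names) := by unfold Pre_sum_by_names_py; infer_instance

def pvWitness_sum_by_names_py : (List (List (String × String))) × List String :=
  ([[("ticketName", "VIP"), ("ticketsIssued", "3")], [("ticketName", "gen")]], [" vip "])

def Spec_sum_by_names_py (ticket_info : List (List (String × String))) (wanted_names : List String) (out : Int) : Prop := out = sum_by_names_py_alt ticket_info wanted_names
instance (ticket_info : List (List (String × String))) (wanted_names : List String) (out : Int) : Decidable (Spec_sum_by_names_py ticket_info wanted_names out) := by unfold Spec_sum_by_names_py; infer_instance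

-- ===== CLAIM (what is proved, stated in full; the proofs are below) =====
def Claim_equal_sum_by_names_py : Prop := ∀ (ticket_info : List (List (String × String))) (wanted_names : List String), Dom_sum_by_names_py ticket_info wanted_names → Pre_sum_by_names_py ticket_info wanted_names → Spec_sum_by_names_py ticket_info wanted_names (sum_by_names_py ticket_info wanted_names)

-- ===== LEMMAS AND PROOFS =====

def pvName (t : List (String × String)) : String :=
  pvNorm (((PySem.Dict.mk t).get? "ticketName").getD "")

def pvRaw (t : List (String × String)) : Option String :=
  (PySem.Dict.mk t).get? "ticketsIssued"

-- one build step moves the per-name grouped sum by exactly A's contribution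
lemma pv_step_sum (W : List String) (hW : W.Nodup) (d : PySem.Dict String (List (Option String)))
    (n : String) (v : Option String) :
    (W.map (fun m => (((d.modify n [] (· ++ [v])).getD m []).map pvVal).sum)).sum
      = (W.map (fun m => ((d.getD m []).map pvVal).sum)).sum + (if n ∈ W then pvVal v else 0) := by
  induction W with
  | nil => simp
  | cons m W ih =>
    rcases List.nodup_cons.mp hW with ⟨hm, hW'⟩
    simp only [List.map_cons, List.sum_cons, PySem.Dict.getD_modify] at ih ⊢
    by_cases hmn : m = n
    · subst hmn
      have hrest : W.map (fun x => ((if x = m then d.getD m [] ++ [v] else d.getD x []).map pvVal).sum)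
          = W.map (fun x => ((d.getD x []).map pvVal).sum) :=
        List.map_congr_left (fun x hx => by
          have hxm : x ≠ m := fun h => hm (h ▸ hx)
          simp [hxm])
      rw [hrest]
      simp
      ring
    · rw [ih hW']
      have hnm : (n ∈ m :: W) ↔ (n ∈ W) := by
        simp only [List.mem_cons]
        exact or_iff_right (fun h => hmn h.symm)
      simp only [hnm, if_neg hmn]
      ring

lemma pv_build_sum (W : List String) (hW : W.Nodup) :
    ∀ (ts : List (List (String × String))) (d : PySem.Dict String (List (Option String))),
    (W.map (fun m => (((ts.foldl (fun d t => d.modify (pvName t) [] (· ++ [pvRaw t])) d).getD m []).map pvVal).sum)).sum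
      = (W.map (fun m => ((d.getD m []).map pvVal).sum)).sum
        + (ts.map (fun t => if pvName t ∈ W then pvVal (pvRaw t) else 0)).sum := by
  intro ts
  induction ts with
  | nil => intro d; simp
  | cons t ts ih =>
    intro d
    simp only [List.foldl_cons, List.map_cons, List.sum_cons]
    rw [ih, pv_step_sum W hW]
    ring

theorem pv_main (ti : List (List (String × String))) (wn : List String) :
    sum_by_names_py ti wn = sum_by_names_py_alt ti wn := by
  have hW : (PySem.Set.ofList (wn.map pvNorm)).Nodup := PySem.Set.nodup_ofList _
  have hA : sum_by_names_py ti wn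
      = (ti.map (fun t => if pvName t ∈ PySem.Set.ofList (wn.map pvNorm) then pvVal (pvRaw t) else 0)).sum := by
    show (ti.foldl (fun total t =>
        if pvName t ∈ PySem.Set.ofList (wn.map pvNorm) then total + pvVal (pvRaw t) else total) 0) = _
    have hfun : (fun (total : Int) t =>
        if pvName t ∈ PySem.Set.ofList (wn.map pvNorm) then total + pvVal (pvRaw t) else total)
        = (fun (total : Int) t => total + if pvName t ∈ PySem.Set.ofList (wn.map pvNorm) then pvVal (pvRaw t) else 0) := by
      funext total t
      by_cases h : pvName t ∈ PySem.Set.ofList (wn.map pvNorm) <;> simp [h]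
    rw [hfun, PySem.List.foldl_add]
    simp
  have hB : sum_by_names_py_alt ti wn
      = (List.map (fun m => (List.map pvVal ((List.foldl (fun d t => d.modify (pvName t) [] (· ++ [pvRaw t])) PySem.Dict.empty ti).getD m [])).sum) (PySem.Set.ofList (wn.map pvNorm))).sum := by
    show (List.foldl (fun acc name => acc + List.foldl (fun s v => s + pvVal v) 0
        ((List.foldl (fun d t => d.modify (pvName t) [] (· ++ [pvRaw t])) PySem.Dict.empty ti).getD name []))
        0 (PySem.Set.ofList (wn.map pvNorm))) = _
    rw [PySem.List.foldl_add]
    simp [PySem.List.foldl_add]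
  rw [hA, hB, pv_build_sum _ hW ti PySem.Dict.empty]
  simp [PySem.Dict.getD_empty]

-- ===== VERDICT (by name: the statement is the Claim_ definition above) =====
theorem sum_by_names_py_spec : Claim_equal_sum_by_names_py := by
  intro ti wn _ _
  unfold Spec_sum_by_names_py
  exact pv_main ti wn
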